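-- pv_equiv track=rewrite | github.com/fleetster22/mod1_python_practice | practice.py | letter_occurences
-- ===== SOURCE A (Python) =====
-- def letter_occurences(str):
--     result = ""
--     cache = {}
--     for letter in str:
--         if letter != " ":
--             if letter not in cache:
--                 cache[letter] = 0
--             cache[letter] += 1
--     for key in cache:
--         result += f"There are {cache[key]} {key}'s. "
--     return result
-- ===== SOURCE B (Python) =====
-- def letter_occurences(str):
--     # Extract-and-remove: repeatedly take the first remaining character, derive its
--     # count from the length drop when all its copies are removed, and recurse on the rest.
--     chars = [c for c in str if c != " "]
--     out = ""
--     while chars: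
--         c = chars[0]
--         rest = [x for x in chars if x != c]
--         out += f"There are {len(chars) - len(rest)} {c}'s. "
--         chars = rest
--     return out
-- ===== Notes on version B (the rewrite author's own statement) =====
-- stated objective: alternative
-- what changed: A counts every character in one pass into a dict and then renders it; B uses no counting structure at all: it repeatedly takes the first remaining non-space character, removes all its copies by filtering, and reads the count off the length drop, recursing on the shrunken list.
import Mathlib
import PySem

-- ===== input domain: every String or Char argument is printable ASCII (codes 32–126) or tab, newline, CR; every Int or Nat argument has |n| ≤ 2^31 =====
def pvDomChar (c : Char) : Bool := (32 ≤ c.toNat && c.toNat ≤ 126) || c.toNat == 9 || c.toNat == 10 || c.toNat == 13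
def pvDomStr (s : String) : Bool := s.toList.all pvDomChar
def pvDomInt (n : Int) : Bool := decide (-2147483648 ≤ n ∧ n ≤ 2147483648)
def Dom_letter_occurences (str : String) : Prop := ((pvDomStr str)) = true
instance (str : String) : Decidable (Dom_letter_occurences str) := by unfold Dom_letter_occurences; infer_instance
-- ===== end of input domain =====

-- B replaces A's dict-accumulating pass by an extract-and-remove loop: take the first
-- remaining character, read its count off the length drop when its copies are removed,
-- recurse on the remainder (objective: alternative algorithm, no counting structure at all).

-- ===== PORT A =====
-- shared formatting helper: the f-string "There are {n} {c}'s. " as a list of chars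
def pvFmt (n : Int) (c : Char) : List Char :=
  "There are ".toList ++ PySem.Int.toChars n ++ (' ' :: c :: "'s. ".toList)

def letter_occurences (str : String) : String :=
  -- result accumulates as a List Char; returned via String.ofList at the end
  let cache : PySem.Dict Char Int := str.toList.foldl
    (fun cache letter =>
      if letter ≠ ' ' then
        let cache := if !(cache.contains letter) then cache.insert letter 0 else cache
        cache.modify letter 0 (· + 1)      -- cache[letter] += 1 (key present, so default 0 is never used)
      else cache)
    PySem.Dict.empty
  let result : List Char := cache.keys.foldl
    (fun result key => result ++ pvFmt (cache.getD key 0) key) []   -- cache[key]: key present, default unused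
  String.ofList result

-- ===== PORT B =====
-- the while loop of Source B: chars strictly shrinks each round (all copies of its head removed)
def pvEmit : List Char → List Char
  | [] => []
  | c :: t =>
    let rest := (c :: t).filter (fun x => x ≠ c)
    pvFmt (((c :: t).length : Int) - rest.length) c ++ pvEmit rest
termination_by l => l.length
decreasing_by
  simp only [List.filter_cons, decide_not, decide_true, Bool.not_true, List.length_cons]
  exact Nat.lt_succ_of_le (List.length_filter_le _ _)

def letter_occurences_alt (str : String) : String :=
  let chars := str.toList.filter (fun c => c ≠ ' ')
  String.ofList (pvEmit chars)

-- ===== PRECONDITION & SPEC =====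
def Spec_letter_occurences (str : String) (out : String) : Prop := out = letter_occurences_alt str
instance (str : String) (out : String) : Decidable (Spec_letter_occurences str out) := by unfold Spec_letter_occurences; infer_instance

-- ===== CLAIM (what is proved, stated in full; the proofs are below) =====
def Claim_equal_letter_occurences : Prop := ∀ (str : String), Dom_letter_occurences str → Spec_letter_occurences str (letter_occurences str)

-- ===== LEMMAS AND PROOFS =====

-- A's per-letter step ("insert 0 if absent, then bump") is exactly Counter's modify step.
lemma stepA_eq_modify (d : PySem.Dict Char Int) (k : Char) :
    (if d.contains k = false then d.insert k 0 else d).modify k 0 (· + 1) = d.modify k 0 (· + 1) := by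
  by_cases h : d.contains k = false
  · simp only [if_pos h, PySem.Dict.modify]
    simp [PySem.Dict.getD_insert_self, PySem.Dict.insert_insert_self,
      PySem.Dict.getD_of_not_contains, h]
  · simp [h]

-- A's dict after the first loop is Counter of the non-space characters.
lemma cache_eq (cs : List Char) :
    cs.foldl (fun cache letter =>
        if letter ≠ ' ' then
          (if !(cache.contains letter) then cache.insert letter 0 else cache).modify letter 0 (· + 1)
        else cache) PySem.Dict.empty
      = PySem.Dict.counter (cs.filter (fun c => c ≠ ' ')) := by
  rw [PySem.Dict.counter_eq_foldl, List.foldl_filter]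
  congr 1
  funext d c
  by_cases h : c = ' ' <;> simp [h, stepA_eq_modify]

-- adding an already-present element never changes anything: the dedup of t and of
-- t with all copies of a present c removed coincide
lemma foldl_add_filter (c : Char) :
    ∀ (t : List Char) (s : PySem.Set Char), c ∈ s →
      t.foldl PySem.Set.add s = (t.filter (fun x => !decide (x = c))).foldl PySem.Set.add s := by
  intro t
  induction t with
  | nil => intro s _; rfl
  | cons x t ih =>
      intro s hc
      by_cases hx : x = c
      · subst hx
        have : PySem.Set.add s x = s := by simp [PySem.Set.add, hc]
        simp [List.foldl_cons, this, ih s hc]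
      · have hc' : c ∈ PySem.Set.add s x := (PySem.Set.mem_add _ _ _).mpr (Or.inl hc)
        simp [List.foldl_cons, hx, ih _ hc']

-- a head element not occurring in t can be peeled off the accumulator
lemma foldl_add_cons (c : Char) :
    ∀ (t : List Char) (s : PySem.Set Char), c ∉ t →
      t.foldl PySem.Set.add (c :: s) = c :: t.foldl PySem.Set.add s := by
  intro t
  induction t with
  | nil => intro s _; rfl
  | cons x t ih =>
      intro s hc
      have hxc : x ≠ c := fun h => hc (by simp [h])
      have hstep : PySem.Set.add (c :: s) x = c :: PySem.Set.add s x := by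
        by_cases hm : x ∈ s
        · simp [PySem.Set.add, hm, hxc]
        · simp [PySem.Set.add, hm, hxc]
      have hct : c ∉ t := fun h => hc (by simp [h])
      simp [List.foldl_cons, hstep, ih _ hct]

-- first-occurrence dedup peels its head: dedup (c :: t) = c :: dedup (t without c)
lemma ofList_cons (c : Char) (t : List Char) :
    PySem.Set.ofList (c :: t)
      = c :: PySem.Set.ofList (t.filter (fun x => !decide (x = c))) := by
  have h0 : PySem.Set.ofList (c :: t) = t.foldl PySem.Set.add [c] := by
    rw [PySem.Set.ofList_eq_foldl]; rfl
  rw [h0, foldl_add_filter c t [c] (by simp)]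
  rw [foldl_add_cons c _ _ (by simp), PySem.Set.ofList_eq_foldl]

-- the copies of c in t plus the survivors of its removal make up all of t
lemma count_add_filter (c : Char) :
    ∀ t : List Char, t.count c + (t.filter (fun x => !decide (x = c))).length = t.length := by
  intro t
  induction t with
  | nil => simp
  | cons x t ih =>
      by_cases h : x = c <;>
        simp [h] <;> omega

-- counts versus length drop: the count of c in c :: t is the number of removed copies
lemma count_eq_length_sub (c : Char) (t : List Char) :
    (((c :: t).count c : Nat) : Int)
      = ((c :: t).length : Int) - ((t.filter (fun x => !decide (x = c))).length : Int) := by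
  have hcount : (c :: t).count c = t.count c + 1 := by simp
  have h := count_add_filter c t
  rw [hcount]
  simp only [List.length_cons]
  push_cast
  omega

-- main: rendering the Counter in key order equals the extract-and-remove recursion
lemma flat_eq : ∀ (l : List Char),
    (PySem.Set.ofList l).flatMap (fun k => pvFmt (l.count k) k) = pvEmit l := by
  intro l
  induction l using pvEmit.induct with
  | case1 => simp [pvEmit]
  | case2 c t rest ih =>
      have hrest : List.filter (fun x => decide (x ≠ c)) (c :: t)
          = t.filter (fun x => !decide (x = c)) := by simp
      rw [pvEmit, ofList_cons]
      simp only [List.flatMap_cons]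
      rw [hrest]
      congr 1
      · congr 1
        exact count_eq_length_sub c t
      · simp only [rest] at ih
        rw [hrest] at ih
        rw [← ih]
        apply List.flatMap_congr
        intro k hk
        have hkt : k ∈ t.filter (fun x => !decide (x = c)) :=
          (PySem.Set.mem_ofList _ _).mp hk
        have hkc : k ≠ c := by
          have := (List.mem_filter.mp hkt).2; simpa using this
        have h1 : (c :: t).count k = t.count k := by
          simp [Ne.symm hkc]
        have h2 : (t.filter (fun x => !decide (x = c))).count k = t.count k :=
          List.count_filter (by simp [hkc])
        rw [h1, h2]

-- ===== VERDICT (by name: the statement is the Claim_ definition above) =====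
theorem letter_occurences_spec : Claim_equal_letter_occurences := by
  intro str _
  unfold Spec_letter_occurences letter_occurences letter_occurences_alt
  simp only [cache_eq, PySem.Dict.keys_counter]
  rw [PySem.List.foldl_append_eq_flatMap]
  simp only [List.nil_append]
  congr 1
  rw [← flat_eq]
  apply List.flatMap_congr
  intro k _
  rw [PySem.Dict.getD_counter]
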